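-- pv_equiv track=rewrite | github.com/JerryAllMighty/AlgorithmAndDataStructures | Uncategorized/Programmers/햄버거 만들기.py | solution
-- ===== SOURCE A (Python) =====
-- def solution(ingredient):
--     answer = 0
--     currentString = ''
--     for i in ingredient:
--         currentString += str(i)
--         if len(currentString) >= 4 and currentString[-4:] == '1231':
--             answer += 1
--             currentString = currentString[:-4]
--     return answer
-- ===== SOURCE B (Python) =====
-- def step(s, c):
--     # KMP automaton of the pattern '1231': s = length of the longest suffix of the
--     # digit stream that is a prefix of '1231' (4 = full match).
--     if c == '1':
--         return 4 if s == 3 else 1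
--     if c == '2':
--         return 2 if s == 1 or s == 4 else 0
--     if c == '3':
--         return 3 if s == 2 else 0
--     return 0
--
-- def solution(ingredient):
--     # No character buffer: a stack of automaton states; popping four states
--     # restores the automaton to the state before the removed '1231'.
--     answer = 0
--     states = [0]
--     for i in ingredient:
--         for c in str(i):
--             states.append(step(states[-1], c))
--         if states[-1] == 4:
--             answer += 1
--             del states[-4:]
--     return answer
-- ===== Notes on version B (the rewrite author's own statement) =====
-- stated objective: alternative
-- what changed: B drops A's character buffer entirely: it runs a KMP automaton for the pattern '1231' over the digit stream and keeps a stack of automaton states, so the suffix test is a single integer comparison and a removal is popping four states.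
import Mathlib
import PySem

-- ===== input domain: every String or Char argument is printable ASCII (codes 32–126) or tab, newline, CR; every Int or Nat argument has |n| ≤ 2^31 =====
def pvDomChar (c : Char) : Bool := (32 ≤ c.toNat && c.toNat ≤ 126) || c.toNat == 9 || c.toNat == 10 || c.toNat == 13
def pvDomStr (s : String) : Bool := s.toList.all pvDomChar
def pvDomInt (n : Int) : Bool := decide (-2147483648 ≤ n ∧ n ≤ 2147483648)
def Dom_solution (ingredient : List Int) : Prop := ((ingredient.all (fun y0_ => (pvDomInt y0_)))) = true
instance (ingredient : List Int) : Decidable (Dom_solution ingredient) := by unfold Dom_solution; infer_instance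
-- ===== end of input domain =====

-- B replaces A's character buffer (suffix comparison and slice truncation) by a stack of
-- KMP-automaton states for the pattern '1231'; same counting behaviour (objective: alternative).

-- ===== PORT A =====
-- currentString is ported as a List Char (PySem.Chars convention); += str(i), s[-4:], s[:-4] are literal.
def solution (ingredient : List Int) : Int :=
  (ingredient.foldl (fun (s : Int × List Char) i =>
    let cur := s.2 ++ PySem.Int.toChars i
    if cur.length ≥ 4 ∧ PySem.List.slice cur (some (-4)) none = ['1', '2', '3', '1'] then
      (s.1 + 1, PySem.List.slice cur none (some (-4)))
    else
      (s.1, cur)) ((0 : Int), ([] : List Char))).1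

-- ===== PORT B =====
-- Source B's `step`: the KMP automaton of the pattern '1231'.
def pvStep (s : Int) (c : Char) : Int :=
  if c = '1' then (if s = 3 then 4 else 1)
  else if c = '2' then (if s = 1 ∨ s = 4 then 2 else 0)
  else if c = '3' then (if s = 2 then 3 else 0)
  else 0

-- states[-1] is ported as pyGetD · (-1) 0; states is never empty, so the default is never read.
def solution_alt (ingredient : List Int) : Int :=
  (ingredient.foldl (fun (s : Int × List Int) i =>
    let sts := (PySem.Int.toChars i).foldl
      (fun r c => r ++ [pvStep (PySem.List.pyGetD r (-1) 0) c]) s.2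
    if PySem.List.pyGetD sts (-1) 0 = 4 then
      (s.1 + 1, PySem.List.slice sts none (some (-4)))
    else
      (s.1, sts)) ((0 : Int), ([(0 : Int)]))).1

-- ===== PRECONDITION & SPEC =====
def Spec_solution (ingredient : List Int) (out : Int) : Prop := out = solution_alt ingredient
instance (ingredient : List Int) (out : Int) : Decidable (Spec_solution ingredient out) := by unfold Spec_solution; infer_instance

-- ===== CLAIM (what is proved, stated in full; the proofs are below) =====
def Claim_equal_solution : Prop := ∀ (ingredient : List Int), Dom_solution ingredient → Spec_solution ingredient (solution ingredient)

-- ===== LEMMAS AND PROOFS =====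

-- B's stack-push step (the lambda in solution_alt), named for the proofs.
def pvPush (r : List Int) (c : Char) : List Int := r ++ [pvStep (PySem.List.pyGetD r (-1) 0) c]

-- The state stack of a character buffer w, and the plain automaton state of w.
def pvStl (w : List Char) : List Int := w.foldl pvPush [(0 : Int)]
def pvKmp (w : List Char) : Int := w.foldl pvStep 0

-- The intended meaning of the automaton state: longest suffix of w that is a prefix of '1231'.
def pvSpec (w : List Char) : Int :=
  if (['1','2','3','1'] : List Char) <:+ w then 4
  else if (['1','2','3'] : List Char) <:+ w then 3
  else if (['1','2'] : List Char) <:+ w then 2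
  else if (['1'] : List Char) <:+ w then 1
  else 0

lemma pv_len_foldl (w : List Char) : ∀ r : List Int,
    (w.foldl pvPush r).length = r.length + w.length := by
  induction w with
  | nil => intro r; simp
  | cons c w ih =>
    intro r
    simp only [List.foldl_cons]
    rw [ih]
    simp [pvPush]
    omega

lemma pv_prefix_foldl (w : List Char) : ∀ r : List Int, r <+: w.foldl pvPush r := by
  induction w with
  | nil => intro r; simp
  | cons c w ih =>
    intro r
    simp only [List.foldl_cons]
    exact (by unfold pvPush; exact List.prefix_append _ _ : r <+: pvPush r c).trans (ih _)

lemma pv_last_foldl (w : List Char) : ∀ (r : List Int), r ≠ [] →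
    PySem.List.pyGetD (w.foldl pvPush r) (-1) 0 = w.foldl pvStep (PySem.List.pyGetD r (-1) 0) := by
  induction w with
  | nil => intro r _; rfl
  | cons c w ih =>
    intro r hr
    simp only [List.foldl_cons]
    rw [ih _ (by simp [pvPush])]
    congr 1
    simp [pvPush, PySem.List.pyGetD_neg_one_append_singleton]

lemma pv_suffix_concat_iff (xs : List Char) (a c : Char) (w : List Char) :
    (xs ++ [a]) <:+ (w ++ [c]) ↔ c = a ∧ xs <:+ w := by
  rw [← List.reverse_prefix, List.reverse_append, List.reverse_append]
  simp only [List.reverse_singleton, List.singleton_append]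
  rw [List.cons_prefix_cons, List.reverse_prefix]
  tauto

lemma pv_last_of_suffix (xs : List Char) (a : Char) (w : List Char)
    (h : (xs ++ [a]) <:+ w) : w.getLast? = some a := by
  obtain ⟨t, ht⟩ := h
  rw [← ht, ← List.append_assoc]
  exact List.getLast?_concat

lemma pv_kmp_eq_spec (w : List Char) : pvKmp w = pvSpec w := by
  induction w using List.reverseRecOn with
  | nil => simp [pvKmp, pvSpec]
  | append_singleton w c ih =>
    have h4 : (['1','2','3','1'] : List Char) <:+ (w ++ [c]) ↔ c = '1' ∧ (['1','2','3'] : List Char) <:+ w := by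
      simpa using pv_suffix_concat_iff ['1','2','3'] '1' c w
    have h3 : (['1','2','3'] : List Char) <:+ (w ++ [c]) ↔ c = '3' ∧ (['1','2'] : List Char) <:+ w := by
      simpa using pv_suffix_concat_iff ['1','2'] '3' c w
    have h2 : (['1','2'] : List Char) <:+ (w ++ [c]) ↔ c = '2' ∧ (['1'] : List Char) <:+ w := by
      simpa using pv_suffix_concat_iff ['1'] '2' c w
    have h1 : (['1'] : List Char) <:+ (w ++ [c]) ↔ c = '1' := by
      simpa using pv_suffix_concat_iff [] '1' c w
    unfold pvKmp at ih ⊢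
    rw [List.foldl_append]
    simp only [List.foldl_cons, List.foldl_nil]
    rw [ih]
    unfold pvSpec
    simp only [h4, h3, h2, h1]
    -- case on the suffix structure of w and on c
    by_cases hA4 : (['1','2','3','1'] : List Char) <:+ w
    · have hL1 : w.getLast? = some '1' := pv_last_of_suffix ['1','2','3'] '1' w hA4
      have hA3 : ¬ (['1','2','3'] : List Char) <:+ w := fun h => by
        have := pv_last_of_suffix ['1','2'] '3' w h; simp [hL1] at this
      have hA2 : ¬ (['1','2'] : List Char) <:+ w := fun h => by
        have := pv_last_of_suffix ['1'] '2' w h; simp [hL1] at this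
      have hA1 : (['1'] : List Char) <:+ w := List.IsSuffix.trans (by decide) hA4
      simp only [hA4, hA3, hA2, hA1, if_false, and_false]
      by_cases hc1 : c = '1' <;> by_cases hc2 : c = '2' <;> by_cases hc3 : c = '3' <;>
        simp_all [pvStep]
    · by_cases hA3 : (['1','2','3'] : List Char) <:+ w
      · have hL3 : w.getLast? = some '3' := pv_last_of_suffix ['1','2'] '3' w hA3
        have hA2 : ¬ (['1','2'] : List Char) <:+ w := fun h => by
          have := pv_last_of_suffix ['1'] '2' w h; simp [hL3] at this
        have hA1 : ¬ (['1'] : List Char) <:+ w := fun h => by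
          have := pv_last_of_suffix [] '1' w h; simp [hL3] at this
        simp only [hA4, hA3, hA2, hA1, if_false, and_false]
        by_cases hc1 : c = '1' <;> by_cases hc2 : c = '2' <;> by_cases hc3 : c = '3' <;>
          simp_all [pvStep]
      · by_cases hA2 : (['1','2'] : List Char) <:+ w
        · have hL2 : w.getLast? = some '2' := pv_last_of_suffix ['1'] '2' w hA2
          have hA1 : ¬ (['1'] : List Char) <:+ w := fun h => by
            have := pv_last_of_suffix [] '1' w h; simp [hL2] at this
          simp only [hA4, hA3, hA2, hA1, if_false, and_false]
          by_cases hc1 : c = '1' <;> by_cases hc2 : c = '2' <;> by_cases hc3 : c = '3' <;>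
            simp_all [pvStep]
        · by_cases hA1 : (['1'] : List Char) <:+ w
          · simp only [hA4, hA3, hA2, hA1, if_false, and_false]
            by_cases hc1 : c = '1' <;> by_cases hc2 : c = '2' <;> by_cases hc3 : c = '3' <;>
              simp_all [pvStep]
          · simp only [hA4, hA3, hA2, hA1, if_false, and_false]
            by_cases hc1 : c = '1' <;> by_cases hc2 : c = '2' <;> by_cases hc3 : c = '3' <;>
              simp_all [pvStep]

-- '1231' is a suffix of w  ⟺  A's test (length ≥ 4 and w[-4:] == '1231')
lemma pv_s4_slice (w : List Char) :
    (['1','2','3','1'] : List Char) <:+ w ↔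
      (w.length ≥ 4 ∧ PySem.List.slice w (some (-4)) none = ['1','2','3','1']) := by
  constructor
  · intro h
    obtain ⟨t, ht⟩ := h
    have hlen : w.length = t.length + 4 := by rw [← ht]; simp
    refine ⟨by omega, ?_⟩
    rw [PySem.List.slice_from_neg_ofNat w 4 (by norm_num)]
    rw [← ht]
    simp
  · rintro ⟨hlen, hsl⟩
    rw [PySem.List.slice_from_neg_ofNat w 4 (by norm_num)] at hsl
    exact ⟨w.take (w.length - 4), by rw [← hsl]; exact List.take_append_drop _ _⟩

-- the state stack determines, and keeps in step with, the character buffer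
lemma pv_top_stl (w : List Char) : PySem.List.pyGetD (pvStl w) (-1) 0 = pvSpec w := by
  unfold pvStl
  rw [pv_last_foldl w [(0 : Int)] (by simp)]
  have : PySem.List.pyGetD [(0 : Int)] (-1) 0 = 0 := by decide
  rw [this, ← pvKmp, pv_kmp_eq_spec]

lemma pv_stl_take (u : List Char) (rest : List Char) :
    (pvStl (u ++ rest)).take ((pvStl u).length) = pvStl u := by
  unfold pvStl
  rw [List.foldl_append]
  obtain ⟨t, ht⟩ := pv_prefix_foldl rest (List.foldl pvPush [(0 : Int)] u)
  rw [← ht]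
  exact List.take_left ..

-- the loop bodies of the two ports, named for the proofs (definitionally the ports' lambdas)
def pvFA : Int × List Char → Int → Int × List Char := fun s i =>
  let cur := s.2 ++ PySem.Int.toChars i
  if cur.length ≥ 4 ∧ PySem.List.slice cur (some (-4)) none = ['1', '2', '3', '1'] then
    (s.1 + 1, PySem.List.slice cur none (some (-4)))
  else
    (s.1, cur)

def pvFB : Int × List Int → Int → Int × List Int := fun s i =>
  let sts := (PySem.Int.toChars i).foldl
    (fun r c => r ++ [pvStep (PySem.List.pyGetD r (-1) 0) c]) s.2
  if PySem.List.pyGetD sts (-1) 0 = 4 then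
    (s.1 + 1, PySem.List.slice sts none (some (-4)))
  else
    (s.1, sts)

-- one element of the main loop: A's step and B's step stay related by pvStl
lemma pv_step (a : Int) (cur : List Char) (i : Int) :
    pvFB (a, pvStl cur) i = ((pvFA (a, cur) i).1, pvStl ((pvFA (a, cur) i).2)) := by
  unfold pvFA pvFB
  simp only
  set t := PySem.Int.toChars i with ht
  set cur0 := cur ++ t with hcur0
  have hsts : t.foldl (fun r c => r ++ [pvStep (PySem.List.pyGetD r (-1) 0) c]) (pvStl cur)
      = pvStl cur0 := by
    unfold pvStl pvPush
    rw [hcur0, List.foldl_append]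
  rw [hsts]
  have hcond : (PySem.List.pyGetD (pvStl cur0) (-1) 0 = 4) ↔
      (cur0.length ≥ 4 ∧ PySem.List.slice cur0 (some (-4)) none = ['1', '2', '3', '1']) := by
    rw [pv_top_stl, ← pv_s4_slice]
    unfold pvSpec
    split_ifs with g4 g3 g2 g1 <;> simp [g4]
  by_cases hm : cur0.length ≥ 4 ∧ PySem.List.slice cur0 (some (-4)) none = ['1', '2', '3', '1']
  · rw [if_pos (hcond.mpr hm), if_pos hm]
    simp only [Prod.mk.injEq, true_and]
    -- match: both pop four
    obtain ⟨u, hu⟩ := (pv_s4_slice cur0).mpr hm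
    have hlen : cur0.length = u.length + 4 := by rw [← hu]; simp
    have hA : PySem.List.slice cur0 none (some (-4)) = u := by
      rw [PySem.List.slice_to_neg_ofNat cur0 4 (by norm_num), ← hu]
      simp
    have hSlen : (pvStl cur0).length = cur0.length + 1 := by
      have := pv_len_foldl cur0 [(0 : Int)]
      simp only [pvStl, List.length_singleton] at this ⊢
      omega
    have hUlen : (pvStl u).length = u.length + 1 := by
      have := pv_len_foldl u [(0 : Int)]
      simp only [pvStl, List.length_singleton] at this ⊢
      omega
    rw [hA, PySem.List.slice_to_neg_ofNat (pvStl cur0) 4 (by norm_num)]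
    have : (pvStl cur0).length - 4 = (pvStl u).length := by omega
    rw [this, ← hu, pv_stl_take]
  · rw [if_neg (fun h => hm (hcond.mp h)), if_neg hm]

lemma pv_main (l : List Int) : ∀ (a : Int) (cur : List Char),
    (l.foldl pvFA (a, cur)).1 = (l.foldl pvFB (a, pvStl cur)).1 := by
  induction l with
  | nil => intro a cur; rfl
  | cons i l ih =>
    intro a cur
    rw [List.foldl_cons, List.foldl_cons, pv_step a cur i]
    exact ih _ _

-- ===== VERDICT (by name: the statement is the Claim_ definition above) =====
theorem solution_spec : Claim_equal_solution := by
  intro ingredient _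
  unfold Spec_solution
  have e1 : solution ingredient = (ingredient.foldl pvFA ((0 : Int), ([] : List Char))).1 := rfl
  have e2 : solution_alt ingredient = (ingredient.foldl pvFB ((0 : Int), [(0 : Int)])).1 := rfl
  rw [e1, e2]
  exact pv_main ingredient 0 []
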